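-- pv_equiv track=rewrite | github.com/DeanHe/Practice | LeetCodePython/CountPartitionsWithMaxMinDifferenceAtMostK.py | countPartitions2
-- ===== SOURCE A (Python) =====
-- from collections import deque
-- from typing import List
--
-- def countPartitions2(nums: List[int], k: int) -> int:
--     MOD = 10 ** 9 + 7
--     sz = len(nums)
--     dp = [0] * (sz + 1)
--     dp[0] = 1
--     dp_pre_sum = [0] * (sz + 1)
--     dp_pre_sum[0] = 1
--     l = 0
--     inc_q = deque()
--     dec_q = deque()
--     for r in range(sz):
--         while inc_q and nums[r] < nums[inc_q[-1]]:
--             inc_q.pop()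
--         inc_q.append(r)
--         while dec_q and nums[dec_q[-1]] < nums[r]:
--             dec_q.pop()
--         dec_q.append(r)
--         while k < nums[dec_q[0]] - nums[inc_q[0]]:
--             l += 1
--             if dec_q[0] < l:
--                 dec_q.popleft()
--             if inc_q[0] < l:
--                 inc_q.popleft()
--         if l > 0:
--             dp[r + 1] = (dp_pre_sum[r] - dp_pre_sum[l - 1] + MOD) % MOD
--         else:
--             dp[r + 1] = dp_pre_sum[r]
--         dp_pre_sum[r + 1] = (dp_pre_sum[r] + dp[r + 1]) % MOD
--     return dp[sz]
-- ===== SOURCE B (Python) =====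
-- def countPartitions2(nums, k):
--     MOD = 10 ** 9 + 7
--     n = len(nums)
--     # sparse tables: mx[j][i] = max(nums[i:i+2**j]), mn[j][i] = min(nums[i:i+2**j])
--     mx = [nums[:]]
--     mn = [nums[:]]
--     j = 1
--     while (1 << j) <= n:
--         pmx, pmn, half = mx[-1], mn[-1], 1 << (j - 1)
--         mx.append([max(pmx[i], pmx[i + half]) for i in range(n - (1 << j) + 1)])
--         mn.append([min(pmn[i], pmn[i + half]) for i in range(n - (1 << j) + 1)])
--         j += 1
--
--     def spread(l, r):  # max - min over nums[l..r] inclusive, O(1)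
--         j = (r - l + 1).bit_length() - 1
--         o = r + 1 - (1 << j)
--         return max(mx[j][l], mx[j][o]) - min(mn[j][l], mn[j][o])
--
--     pre = [1]        # pre[i] = (dp[0] + ... + dp[i]) % MOD
--     dp_r = 1         # dp[0] = 1
--     for r in range(n):
--         # smallest l in [0, r] with spread(l, r) <= k (validity is monotone in l); r+1 if none
--         lo, hi = 0, r + 1
--         while lo < hi:
--             mid = (lo + hi) // 2
--             if spread(mid, r) <= k:
--                 hi = mid
--             else:
--                 lo = mid + 1
--         if lo == r + 1:
--             dp_r = 0
--         else:
--             dp_r = (pre[r] - (pre[lo - 1] if lo > 0 else 0)) % MOD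
--         pre.append((pre[r] + dp_r) % MOD)
--     return dp_r
-- ===== Notes on version B (the rewrite author's own statement) =====
-- stated objective: alternative
-- what changed: A's monotonic-deque two-pointer window is replaced by precomputed sparse min/max tables plus a per-index binary search for the smallest valid window start; the dp/prefix-sum recurrence is kept.
import Mathlib
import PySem

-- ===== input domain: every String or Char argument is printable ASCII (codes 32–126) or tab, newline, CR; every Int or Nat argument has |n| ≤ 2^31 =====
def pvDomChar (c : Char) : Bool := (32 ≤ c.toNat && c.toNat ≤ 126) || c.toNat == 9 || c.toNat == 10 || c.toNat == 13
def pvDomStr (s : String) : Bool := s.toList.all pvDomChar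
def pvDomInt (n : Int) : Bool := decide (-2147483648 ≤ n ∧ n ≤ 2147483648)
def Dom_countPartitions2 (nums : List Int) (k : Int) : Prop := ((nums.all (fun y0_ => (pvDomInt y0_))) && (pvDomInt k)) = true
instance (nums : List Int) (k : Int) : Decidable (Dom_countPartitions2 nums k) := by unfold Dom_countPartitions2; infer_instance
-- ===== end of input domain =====

-- B replaces A's monotonic-deque two-pointer window by sparse min/max tables plus a
-- binary search for the smallest valid window start (the dp/prefix-sum recurrence stays).

-- ===== PORT A =====
-- deques are stored back-to-front: Python q.append(x) = x :: q, q[-1] = head, q[0] = getLast, q.pop() = tail, q.popleft() = dropLast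

-- while inc_q and nums[r] < nums[inc_q[-1]]: inc_q.pop()
def popIncA (nums : List Int) (r : Nat) : List Nat → List Nat
  | [] => []
  | b :: t => if nums.getD r 0 < nums.getD b 0 then popIncA nums r t else b :: t

-- while dec_q and nums[dec_q[-1]] < nums[r]: dec_q.pop()
def popDecA (nums : List Int) (r : Nat) : List Nat → List Nat
  | [] => []
  | b :: t => if nums.getD b 0 < nums.getD r 0 then popDecA nums r t else b :: t

-- while k < nums[dec_q[0]] - nums[inc_q[0]]: l += 1; popleft as needed
-- (fuel ≥ sz suffices on every input where the Python loop terminates; on k < 0, nums ≠ [] Python raises IndexError — excluded by Pre_)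
def advA (nums : List Int) (k : Int) : Nat → Nat → List Nat → List Nat → Nat × List Nat × List Nat
  | 0, l, inc, dec => (l, inc, dec)
  | fuel + 1, l, inc, dec =>
    if k < nums.getD (dec.getLast?.getD 0) 0 - nums.getD (inc.getLast?.getD 0) 0 then
      let l' := l + 1
      let dec' := if dec.getLast?.getD 0 < l' then dec.dropLast else dec
      let inc' := if inc.getLast?.getD 0 < l' then inc.dropLast else inc
      advA nums k fuel l' inc' dec'
    else (l, inc, dec)

-- one iteration of A's `for r in range(sz)` body; state (dp, dp_pre_sum, l, inc_q, dec_q)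
def stepA (nums : List Int) (k : Int) (sz : Nat)
    (s : List Int × List Int × Nat × List Nat × List Nat) (r : Nat) :
    List Int × List Int × Nat × List Nat × List Nat :=
  let (dp, pre, l, inc, dec) := s
  let inc1 := r :: popIncA nums r inc
  let dec1 := r :: popDecA nums r dec
  let (l2, inc2, dec2) := advA nums k sz l inc1 dec1
  let dpv : Int :=
    if 0 < l2 then PySem.Int.mod (pre.getD r 0 - pre.getD (l2 - 1) 0 + 1000000007) 1000000007
    else pre.getD r 0
  (dp.set (r + 1) dpv, pre.set (r + 1) (PySem.Int.mod (pre.getD r 0 + dpv) 1000000007), l2, inc2, dec2)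

def countPartitions2 (nums : List Int) (k : Int) : Int :=
  let sz := nums.length
  let dp0 := (List.replicate (sz + 1) (0 : Int)).set 0 1
  let pre0 := (List.replicate (sz + 1) (0 : Int)).set 0 1
  let s := (List.range sz).foldl (stepA nums k sz) (dp0, pre0, 0, [], [])
  s.1.getD sz 0

-- ===== PORT B =====

-- while (1 << j) <= n: append the next sparse-table level (fuel n+1 ≥ number of levels)
def buildTabB (nums : List Int) (n : Nat) :
    Nat → Nat → List (List Int) × List (List Int) → List (List Int) × List (List Int)
  | 0, _, t => t
  | fuel + 1, j, (mx, mn) =>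
    if 1 <<< j ≤ n then
      let pmx := mx.getLast?.getD []
      let pmn := mn.getLast?.getD []
      let half := 1 <<< (j - 1)
      let len := n - (1 <<< j) + 1
      let nmx := (List.range len).map (fun i => max (pmx.getD i 0) (pmx.getD (i + half) 0))
      let nmn := (List.range len).map (fun i => min (pmn.getD i 0) (pmn.getD (i + half) 0))
      buildTabB nums n fuel (j + 1) (mx ++ [nmx], mn ++ [nmn])
    else (mx, mn)

-- spread(l, r): (r-l+1).bit_length()-1 is PySem.Int.bitLength; 1 << j is <<<
def spreadB (mx mn : List (List Int)) (l r : Nat) : Int :=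
  let j := PySem.Int.bitLength ((r - l + 1 : Nat) : Int) - 1
  let o := r + 1 - (1 <<< j)
  let mxj := mx.getD j []
  let mnj := mn.getD j []
  max (mxj.getD l 0) (mxj.getD o 0) - min (mnj.getD l 0) (mnj.getD o 0)

-- binary search: while lo < hi … (fuel ≥ hi - lo suffices)
def bsB (mx mn : List (List Int)) (k : Int) (r : Nat) : Nat → Nat → Nat → Nat
  | 0, lo, _ => lo
  | fuel + 1, lo, hi =>
    if lo < hi then
      let mid := (lo + hi) / 2
      if spreadB mx mn mid r ≤ k then bsB mx mn k r fuel lo mid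
      else bsB mx mn k r fuel (mid + 1) hi
    else lo

-- one iteration of B's `for r in range(n)` body; state (pre, dp_r)
def stepB (mx mn : List (List Int)) (k : Int) (s : List Int × Int) (r : Nat) : List Int × Int :=
  let (pre, _) := s
  let lo := bsB mx mn k r (r + 1) 0 (r + 1)
  let dpv : Int :=
    if lo = r + 1 then 0
    else PySem.Int.mod (pre.getD r 0 - (if 0 < lo then pre.getD (lo - 1) 0 else 0)) 1000000007
  (pre ++ [PySem.Int.mod (pre.getD r 0 + dpv) 1000000007], dpv)

def countPartitions2_alt (nums : List Int) (k : Int) : Int :=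
  let n := nums.length
  let t := buildTabB nums n (n + 1) 1 ([nums], [nums])
  ((List.range n).foldl (stepB t.1 t.2 k) ([1], 1)).2

-- ===== PRECONDITION & SPEC =====
-- Pre_ excludes nums ≠ [] with k < 0, on which A's window can never become valid and it
-- raises IndexError reading the front of an emptied deque.
def Pre_countPartitions2 (nums : List Int) (k : Int) : Prop := nums = [] ∨ 0 ≤ k
instance (nums : List Int) (k : Int) : Decidable (Pre_countPartitions2 nums k) := by
  unfold Pre_countPartitions2; infer_instance

def pvWitness_countPartitions2 : List Int × Int := ([3, 1, 4, 1, 5], 3)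

def Spec_countPartitions2 (nums : List Int) (k : Int) (out : Int) : Prop := out = countPartitions2_alt nums k
instance (nums : List Int) (k : Int) (out : Int) : Decidable (Spec_countPartitions2 nums k out) := by
  unfold Spec_countPartitions2; infer_instance

-- ===== CLAIM (what is proved, stated in full; the proofs are below) =====
def Claim_equal_countPartitions2 : Prop := ∀ (nums : List Int) (k : Int), Dom_countPartitions2 nums k → Pre_countPartitions2 nums k → Spec_countPartitions2 nums k (countPartitions2 nums k)


-- ===== LEMMAS AND PROOFS =====

-- ---------- spec-level definitions ----------
def gI (nums : List Int) (i : Nat) : Int := nums.getD i 0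

-- max of nums[l..r] (inclusive), by structural recursion on the width
def wmax (nums : List Int) (l r : Nat) : Int :=
  if _ : l < r then max (gI nums l) (wmax nums (l + 1) r) else gI nums l
termination_by r - l

def wmin (nums : List Int) (l r : Nat) : Int :=
  if _ : l < r then min (gI nums l) (wmin nums (l + 1) r) else gI nums l
termination_by r - l

-- smallest l ≤ r with max-min of nums[l..r] ≤ k; r+1 if none
def minl (nums : List Int) (k : Int) (r : Nat) : Nat :=
  (((List.range (r + 1)).find? (fun l => decide (wmax nums l r - wmin nums l r ≤ k))).getD (r + 1))

-- reference state after processing r elements: (prefix-sum list pre[0..r], dp_r)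
def Sspec (nums : List Int) (k : Int) : Nat → List Int × Int
  | 0 => ([1], 1)
  | r + 1 =>
    let pre := (Sspec nums k r).1
    let lo := minl nums k r
    let dpv : Int :=
      if lo = r + 1 then 0
      else PySem.Int.mod (pre.getD r 0 - (if 0 < lo then pre.getD (lo - 1) 0 else 0)) 1000000007
    (pre ++ [PySem.Int.mod (pre.getD r 0 + dpv) 1000000007], dpv)

-- the dp list A maintains: dp[0..r]
def dpLspec (nums : List Int) (k : Int) : Nat → List Int
  | 0 => [1]
  | r + 1 => dpLspec nums k r ++ [(Sspec nums k (r + 1)).2]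

-- ---------- wmax / wmin basics ----------
lemma wmax_self (nums : List Int) (l : Nat) : wmax nums l l = gI nums l := by
  unfold wmax; simp

lemma wmin_self (nums : List Int) (l : Nat) : wmin nums l l = gI nums l := by
  unfold wmin; simp

lemma wmax_attained (nums : List Int) : ∀ l r, l ≤ r → ∃ m, l ≤ m ∧ m ≤ r ∧ wmax nums l r = gI nums m := by
  intro l r h
  rw [wmax]
  split
  case isTrue hlt =>
    obtain ⟨m, h1, h2, h3⟩ := wmax_attained nums (l + 1) r hlt
    rcases le_or_gt (gI nums l) (wmax nums (l + 1) r) with hc | hc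
    · exact ⟨m, by omega, h2, by rw [max_eq_right hc, h3]⟩
    · exact ⟨l, le_rfl, h, by rw [max_eq_left (le_of_lt hc)]⟩
  case isFalse => exact ⟨l, le_rfl, h, rfl⟩
termination_by l r _ => r - l

lemma wmin_attained (nums : List Int) : ∀ l r, l ≤ r → ∃ m, l ≤ m ∧ m ≤ r ∧ wmin nums l r = gI nums m := by
  intro l r h
  rw [wmin]
  split
  case isTrue hlt =>
    obtain ⟨m, h1, h2, h3⟩ := wmin_attained nums (l + 1) r hlt
    rcases le_or_gt (wmin nums (l + 1) r) (gI nums l) with hc | hc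
    · exact ⟨m, by omega, h2, by rw [min_eq_right hc, h3]⟩
    · exact ⟨l, le_rfl, h, by rw [min_eq_left (le_of_lt hc)]⟩
  case isFalse => exact ⟨l, le_rfl, h, rfl⟩
termination_by l r _ => r - l

lemma le_wmax (nums : List Int) : ∀ l r j, l ≤ j → j ≤ r → gI nums j ≤ wmax nums l r := by
  intro l r j h1 h2
  rw [wmax]
  split
  case isTrue hlt =>
    rcases Nat.eq_or_lt_of_le h1 with rfl | hj
    · exact le_max_left _ _
    · exact le_trans (le_wmax nums (l + 1) r j hj h2) (le_max_right _ _)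
  case isFalse hge => have : l = j := by omega
                      rw [this]
termination_by l r j _ _ => r - l

lemma wmin_le (nums : List Int) : ∀ l r j, l ≤ j → j ≤ r → wmin nums l r ≤ gI nums j := by
  intro l r j h1 h2
  rw [wmin]
  split
  case isTrue hlt =>
    rcases Nat.eq_or_lt_of_le h1 with rfl | hj
    · exact min_le_left _ _
    · exact le_trans (min_le_right _ _) (wmin_le nums (l + 1) r j hj h2)
  case isFalse hge => have : l = j := by omega
                      rw [this]
termination_by l r j _ _ => r - l

lemma wmax_union (nums : List Int) : ∀ l m r, l ≤ m → m < r → max (wmax nums l m) (wmax nums (m + 1) r) = wmax nums l r := by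
  intro l m r h1 h2
  rcases Nat.eq_or_lt_of_le h1 with rfl | hlm
  · rw [wmax_self]
    conv_rhs => rw [wmax]
    rw [dif_pos h2]
  · have := wmax_union nums (l + 1) m r (by omega) h2
    rw [show wmax nums l m = if _ : l < m then max (gI nums l) (wmax nums (l + 1) m) else gI nums l from by rw [wmax],
        dif_pos hlm, max_assoc, this,
        show wmax nums l r = if _ : l < r then max (gI nums l) (wmax nums (l + 1) r) else gI nums l from by rw [wmax],
        dif_pos (by omega)]
termination_by l m r _ _ => m - l

lemma wmin_union (nums : List Int) : ∀ l m r, l ≤ m → m < r → min (wmin nums l m) (wmin nums (m + 1) r) = wmin nums l r := by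
  intro l m r h1 h2
  rcases Nat.eq_or_lt_of_le h1 with rfl | hlm
  · rw [wmin_self]
    conv_rhs => rw [wmin]
    rw [dif_pos h2]
  · have := wmin_union nums (l + 1) m r (by omega) h2
    rw [show wmin nums l m = if _ : l < m then min (gI nums l) (wmin nums (l + 1) m) else gI nums l from by rw [wmin],
        dif_pos hlm, min_assoc, this,
        show wmin nums l r = if _ : l < r then min (gI nums l) (wmin nums (l + 1) r) else gI nums l from by rw [wmin],
        dif_pos (by omega)]
termination_by l m r _ _ => m - l

lemma wmax_sub (nums : List Int) (l a b r : Nat) (h1 : l ≤ a) (h2 : a ≤ b) (h3 : b ≤ r) :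
    wmax nums a b ≤ wmax nums l r := by
  obtain ⟨m, hm1, hm2, hm3⟩ := wmax_attained nums a b h2
  rw [hm3]; exact le_wmax nums l r m (le_trans h1 hm1) (le_trans hm2 h3)

lemma wmin_sub (nums : List Int) (l a b r : Nat) (h1 : l ≤ a) (h2 : a ≤ b) (h3 : b ≤ r) :
    wmin nums l r ≤ wmin nums a b := by
  obtain ⟨m, hm1, hm2, hm3⟩ := wmin_attained nums a b h2
  rw [hm3]; exact wmin_le nums l r m (le_trans h1 hm1) (le_trans hm2 h3)

-- overlapping-windows union (the sparse-table query shape)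
lemma wmax_overlap (nums : List Int) (l m o r : Nat) (hlm : l ≤ m) (hor : o ≤ r)
    (hlo : l ≤ o) (hom : o ≤ m + 1) (hmr : m ≤ r) :
    max (wmax nums l m) (wmax nums o r) = wmax nums l r := by
  apply le_antisymm
  · exact max_le (wmax_sub nums l l m r le_rfl hlm hmr) (wmax_sub nums l o r r hlo hor le_rfl)
  · obtain ⟨ms, hm1, hm2, hm3⟩ := wmax_attained nums l r (le_trans hlm hmr)
    rw [hm3]
    rcases le_or_gt ms m with hc | hc
    · exact le_trans (le_wmax nums l m ms hm1 hc) (le_max_left _ _)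
    · exact le_trans (le_wmax nums o r ms (by omega) hm2) (le_max_right _ _)

lemma wmin_overlap (nums : List Int) (l m o r : Nat) (hlm : l ≤ m) (hor : o ≤ r)
    (hlo : l ≤ o) (hom : o ≤ m + 1) (hmr : m ≤ r) :
    min (wmin nums l m) (wmin nums o r) = wmin nums l r := by
  apply le_antisymm
  · obtain ⟨ms, hm1, hm2, hm3⟩ := wmin_attained nums l r (le_trans hlm hmr)
    rw [hm3]
    rcases le_or_gt ms m with hc | hc
    · exact le_trans (min_le_left _ _) (wmin_le nums l m ms hm1 hc)
    · exact le_trans (min_le_right _ _) (wmin_le nums o r ms (by omega) hm2)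
  · exact le_min (wmin_sub nums l l m r le_rfl hlm hmr) (wmin_sub nums l o r r hlo hor le_rfl)

-- ---------- validity and minl ----------
def vld (nums : List Int) (k : Int) (l r : Nat) : Prop := wmax nums l r - wmin nums l r ≤ k

lemma vld_mono (nums : List Int) (k : Int) (l l' r : Nat) (h1 : l ≤ l') (h2 : l' ≤ r)
    (h : vld nums k l r) : vld nums k l' r := by
  unfold vld at *
  have := wmax_sub nums l l' r r h1 h2 le_rfl
  have := wmin_sub nums l l' r r h1 h2 le_rfl
  omega

lemma vld_shrink (nums : List Int) (k : Int) (l r' r : Nat) (h1 : l ≤ r') (h2 : r' ≤ r)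
    (h : vld nums k l r) : vld nums k l r' := by
  unfold vld at *
  have := wmax_sub nums l l r' r le_rfl h1 h2
  have := wmin_sub nums l l r' r le_rfl h1 h2
  omega

lemma vld_self (nums : List Int) (k : Int) (r : Nat) (hk : 0 ≤ k) : vld nums k r r := by
  unfold vld; rw [wmax_self, wmin_self]; omega

lemma minl_le_succ (nums : List Int) (k : Int) (r : Nat) : minl nums k r ≤ r + 1 := by
  unfold minl
  cases h : (List.range (r + 1)).find? (fun l => decide (wmax nums l r - wmin nums l r ≤ k)) with
  | none => simp
  | some L =>
    have := List.find?_some h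
    have hmem := List.mem_of_find?_eq_some h
    simp only [List.mem_range] at hmem
    simpa using Nat.le_of_lt_succ hmem |>.trans (by omega)

lemma minl_not_vld (nums : List Int) (k : Int) (r : Nat) :
    ∀ l', l' < minl nums k r → ¬ vld nums k l' r := by
  intro l' hl'
  unfold minl at hl'
  cases h : (List.range (r + 1)).find? (fun l => decide (wmax nums l r - wmin nums l r ≤ k)) with
  | none =>
    simp only [h, Option.getD_none] at hl'
    have hc := List.find?_eq_none.mp h l' (by simp [List.mem_range]; omega)
    simpa [vld] using hc
  | some L =>
    simp only [h, Option.getD_some] at hl'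
    rw [List.find?_eq_some_iff_getElem] at h
    obtain ⟨hp, i, hi, hgi, hfirst⟩ := h
    simp only [List.getElem_range] at hgi
    subst hgi
    have := hfirst l' hl'
    simp only [List.getElem_range] at this
    simpa [vld] using this

lemma minl_vld (nums : List Int) (k : Int) (r : Nat) (h : minl nums k r ≤ r) :
    vld nums k (minl nums k r) r := by
  unfold minl at *
  cases hf : (List.range (r + 1)).find? (fun l => decide (wmax nums l r - wmin nums l r ≤ k)) with
  | none => simp only [hf, Option.getD_none] at h; omega
  | some L =>
    simp only [hf, Option.getD_some] at h ⊢
    have := List.find?_some hf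
    simpa [vld] using this

lemma minl_le_of_vld (nums : List Int) (k : Int) (l r : Nat) (hl : l ≤ r) (h : vld nums k l r) :
    minl nums k r ≤ l := by
  by_contra hc
  exact minl_not_vld nums k r l (by omega) h

lemma minl_le (nums : List Int) (k : Int) (r : Nat) (hk : 0 ≤ k) : minl nums k r ≤ r :=
  minl_le_of_vld nums k r r le_rfl (vld_self nums k r hk)

lemma minl_mono (nums : List Int) (k : Int) (r : Nat) (hk : 0 ≤ k) (hr : 1 ≤ r) :
    minl nums k (r - 1) ≤ minl nums k r := by
  have h1 := minl_le nums k r hk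
  rcases Nat.lt_or_ge (minl nums k r) r with h | h
  · apply minl_le_of_vld nums k (minl nums k r) (r - 1) (by omega)
    exact vld_shrink nums k (minl nums k r) (r - 1) r (by omega) (by omega)
      (minl_vld nums k r h1)
  · have h2 := minl_le nums k (r - 1) hk
    omega

-- ---------- monotonic deque invariant ----------
def QRel (v : Nat → Int) (le : Int → Int → Prop) (a b : Nat) : Prop :=
  b < a ∧ le (v a) (v b) ∧ ∀ j, b < j → j ≤ a → le (v j) (v a)

def QInv (v : Nat → Int) (le : Int → Int → Prop) (l r : Nat) (q : List Nat) : Prop :=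
  q.head? = some r ∧ q.IsChain (QRel v le) ∧
  ∃ c, q.getLast? = some c ∧ l ≤ c ∧ ∀ j, l ≤ j → j ≤ c → le (v j) (v c)

lemma chain_le_head (v : Nat → Int) (le : Int → Int → Prop) :
    ∀ (q : List Nat) (h : Nat), q.IsChain (QRel v le) → q.head? = some h → ∀ x ∈ q, x ≤ h := by
  intro q
  induction q with
  | nil => simp
  | cons a t ih =>
    intro h hch hh x hx
    simp only [List.head?_cons, Option.some.injEq] at hh
    subst hh
    rcases List.mem_cons.mp hx with rfl | hxt
    · exact le_rfl
    · cases t with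
      | nil => simp at hxt
      | cons b t' =>
        rw [List.isChain_cons] at hch
        obtain ⟨hab, hch'⟩ := hch
        have hba : QRel v le a b := hab b rfl
        have h1 := hba.1
        have := ih b hch' rfl x hxt
        omega

lemma chain_vals (v : Nat → Int) (le : Int → Int → Prop)
    (htr : ∀ a b c, le a b → le b c → le a c) (hrefl : ∀ a, le a a) :
    ∀ (q : List Nat) (a c : Nat), q.IsChain (QRel v le) → q.head? = some a →
      q.getLast? = some c → le (v a) (v c) := by
  intro q
  induction q with
  | nil => simp
  | cons x t ih =>
    intro a c hch hh hl
    simp only [List.head?_cons, Option.some.injEq] at hh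
    subst hh
    cases t with
    | nil =>
      simp only [List.getLast?_singleton, Option.some.injEq] at hl
      subst hl; exact hrefl _
    | cons b t' =>
      rw [List.isChain_cons] at hch
      obtain ⟨hab, hch'⟩ := hch
      have hba := hab b rfl
      rw [List.getLast?_cons_cons] at hl
      exact htr _ _ _ hba.2.1 (ih b c hch' rfl hl)

lemma window_bound (v : Nat → Int) (le : Int → Int → Prop)
    (htr : ∀ a b c, le a b → le b c → le a c) (hrefl : ∀ a, le a a) :
    ∀ (q : List Nat) (l r c : Nat), QInv v le l r q → q.getLast? = some c →
      ∀ j, l ≤ j → j ≤ r → le (v j) (v c) := by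
  intro q
  induction q with
  | nil => rintro l r c ⟨hh, _⟩; simp at hh
  | cons a t ih =>
    rintro l r c ⟨hh, hch, c', hl', hlc', hbd'⟩ hl j hj1 hj2
    simp only [List.head?_cons, Option.some.injEq] at hh
    subst hh
    cases t with
    | nil =>
      simp only [List.getLast?_singleton, Option.some.injEq] at hl hl'
      subst hl; subst hl'
      exact hbd' j hj1 hj2
    | cons b t' =>
      rw [List.getLast?_cons_cons] at hl hl'
      rw [List.isChain_cons] at hch
      obtain ⟨hab, hch'⟩ := hch
      have hba : QRel v le a b := hab b rfl
      rcases le_or_gt j b with hj | hj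
      · exact ih l b c ⟨rfl, hch', c', hl', hlc', hbd'⟩ hl j hj1 hj
      · have h1 : le (v j) (v a) := hba.2.2 j hj hj2
        have h2 : le (v a) (v c) :=
          chain_vals v le htr hrefl (a :: b :: t') a c
            (by rw [List.isChain_cons]; exact ⟨hab, hch'⟩) rfl
            (by rw [List.getLast?_cons_cons]; exact hl)
        exact htr _ _ _ h1 h2

lemma gap_cover (v : Nat → Int) (le : Int → Int → Prop)
    (htr : ∀ a b c, le a b → le b c → le a c) (y : Int) :
    ∀ (d : List Nat) (b : Nat) (t : List Nat) (r : Nat),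
      (d ++ b :: t).IsChain (QRel v le) → (d ++ b :: t).head? = some r →
      (∀ x ∈ d, le (v x) y) → ∀ j, b < j → j ≤ r → le (v j) y := by
  intro d
  induction d with
  | nil =>
    intro b t r _ hh hd j hj1 hj2
    simp only [List.nil_append, List.head?_cons, Option.some.injEq] at hh
    omega
  | cons c d' ih =>
    intro b t r hch hh hd j hj1 hj2
    simp only [List.cons_append, List.head?_cons, Option.some.injEq] at hh
    subst hh
    rw [List.cons_append, List.isChain_cons] at hch
    obtain ⟨hcx, hch'⟩ := hch
    have hcy : le (v c) y := hd c (List.mem_cons_self ..)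
    cases d' with
    | nil =>
      have hcb : QRel v le c b := hcx b rfl
      exact htr _ _ _ (hcb.2.2 j hj1 hj2) hcy
    | cons c2 d'' =>
      have hcc2 : QRel v le c c2 := hcx c2 rfl
      rcases le_or_gt j c2 with hj | hj
      · exact ih b t c2 hch' rfl (fun x hx => hd x (List.mem_cons_of_mem _ hx)) j hj1 hj
      · exact htr _ _ _ (hcc2.2.2 j hj hj2) hcy

lemma push_inv (v : Nat → Int) (le : Int → Int → Prop)
    (htr : ∀ a b c, le a b → le b c → le a c) (hrefl : ∀ a, le a a)
    (htot : ∀ a b, ¬ le a b → le b a)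
    (l r : Nat) (q q' d : List Nat)
    (hq : QInv v le l r q) (hsplit : q = d ++ q')
    (hpop : ∀ x ∈ d, ¬ le (v (r + 1)) (v x))
    (hkeep : ∀ b t, q' = b :: t → le (v (r + 1)) (v b)) :
    QInv v le l (r + 1) ((r + 1) :: q') := by
  obtain ⟨hhead, hchain, c, hlast, hlc, hbound⟩ := hq
  have hcq : c ∈ q := by
    have : c ∈ q.getLast? := by rw [hlast]; rfl
    obtain ⟨hne, rfl⟩ := List.mem_getLast?_eq_getLast this
    exact List.getLast_mem hne
  have hcr : c ≤ r := chain_le_head v le q r hchain hhead c hcq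
  cases q' with
  | nil =>
    have hdq : d = q := by rw [hsplit, List.append_nil]
    refine ⟨rfl, by simp, r + 1, rfl, by omega, ?_⟩
    intro j hj1 hj2
    rcases Nat.eq_or_lt_of_le hj2 with rfl | hj
    · exact hrefl _
    · have h1 : le (v j) (v c) :=
        window_bound v le htr hrefl q l r c ⟨hhead, hchain, c, hlast, hlc, hbound⟩ hlast j hj1 (by omega)
      have h2 : le (v c) (v (r + 1)) := htot _ _ (hpop c (hdq ▸ hcq))
      exact htr _ _ _ h1 h2
  | cons b t =>
    have hbq : b ∈ q := by rw [hsplit]; exact List.mem_append_right _ (List.mem_cons_self ..)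
    have hbr : b ≤ r := chain_le_head v le q r hchain hhead b hbq
    have hch2 : (b :: t).IsChain (QRel v le) := by
      rw [hsplit, List.isChain_append] at hchain
      exact hchain.2.1
    refine ⟨rfl, ?_, c, ?_, hlc, hbound⟩
    · rw [List.isChain_cons]
      refine ⟨?_, hch2⟩
      intro y hy
      replace hy : b = y := by simpa using hy
      subst hy
      refine ⟨by omega, hkeep b t rfl, ?_⟩
      intro j hj1 hj2
      rcases Nat.eq_or_lt_of_le hj2 with rfl | hj
      · exact hrefl _
      · exact gap_cover v le htr (v (r + 1)) d b t r (hsplit ▸ hchain) (hsplit ▸ hhead)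
          (fun x hx => htot _ _ (hpop x hx)) j hj1 (by omega)
    · rw [List.getLast?_cons_cons]
      rw [hsplit, List.getLast?_append_of_ne_nil d (by simp)] at hlast
      exact hlast

lemma adv_inv (v : Nat → Int) (le : Int → Int → Prop) (l r : Nat) (q : List Nat)
    (hq : QInv v le l r q) (hlr : l + 1 ≤ r) :
    QInv v le (l + 1) r (if q.getLast?.getD 0 < l + 1 then q.dropLast else q) := by
  obtain ⟨hhead, hchain, c, hlast, hlc, hbound⟩ := hq
  rw [hlast]
  simp only [Option.getD_some]
  split_ifs with hpop
  · -- the front (= getLast of the reversed list) drops out: c = l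
    have hcl : c = l := by omega
    cases q with
    | nil => simp at hhead
    | cons a t =>
      simp only [List.head?_cons, Option.some.injEq] at hhead
      subst hhead
      cases t with
      | nil =>
        simp only [List.getLast?_singleton, Option.some.injEq] at hlast
        omega
      | cons b t' =>
        have hne : (a :: b :: t' : List Nat) ≠ [] := by simp
        have hgl : (a :: b :: t').getLast hne = c := by
          have h1 := List.getLast?_eq_some_getLast hne
          rw [hlast] at h1
          exact (Option.some.injEq _ _ ▸ h1).symm
        have hdecomp : (a :: b :: t').dropLast ++ [c] = a :: b :: t' := by
          rw [← hgl]; exact List.dropLast_append_getLast hne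
        have hch2 := hchain
        rw [← hdecomp, List.isChain_append] at hch2
        obtain ⟨hchL, _, hconn⟩ := hch2
        have hne2 : (a :: b :: t').dropLast ≠ [] := by simp
        have hc'last : (a :: b :: t').dropLast.getLast? = some ((a :: b :: t').dropLast.getLast hne2) :=
          List.getLast?_eq_some_getLast hne2
        have hrel : QRel v le ((a :: b :: t').dropLast.getLast hne2) c :=
          hconn _ hc'last c rfl
        have hb0 := hrel.1
        refine ⟨?_, hchL, (a :: b :: t').dropLast.getLast hne2, hc'last, by omega, ?_⟩
        · simp
        · intro j hj1 hj2
          have hb1 := hrel.1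
          exact hrel.2.2 j (by omega) hj2
  · exact ⟨hhead, hchain, c, hlast, by omega, fun j hj1 hj2 => hbound j (by omega) hj2⟩

-- head of a QInv deque (stored back-to-front, so .getLast?) is the window extremum
lemma qinv_dec_last (nums : List Int) (k : Int) (l r : Nat) (q : List Nat)
    (hq : QInv (gI nums) (fun a b => a ≤ b) l r q) :
    gI nums (q.getLast?.getD 0) = wmax nums l r := by
  obtain ⟨hhead, hchain, c, hlast, hlc, hbound⟩ := hq
  rw [hlast]
  simp only [Option.getD_some]
  have hcq : c ∈ q := by
    have : c ∈ q.getLast? := by rw [hlast]; rfl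
    obtain ⟨hne, rfl⟩ := List.mem_getLast?_eq_getLast this
    exact List.getLast_mem hne
  have hcr : c ≤ r := chain_le_head _ _ q r hchain hhead c hcq
  apply le_antisymm
  · exact le_wmax nums l r c hlc hcr
  · obtain ⟨m, hm1, hm2, hm3⟩ := wmax_attained nums l r (by omega)
    rw [hm3]
    exact window_bound (gI nums) (fun a b => a ≤ b) (fun a b c h1 h2 => le_trans h1 h2)
      (fun a => le_rfl) q l r c ⟨hhead, hchain, c, hlast, hlc, hbound⟩ hlast m hm1 hm2

lemma qinv_inc_last (nums : List Int) (k : Int) (l r : Nat) (q : List Nat)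
    (hq : QInv (gI nums) (fun a b => b ≤ a) l r q) :
    gI nums (q.getLast?.getD 0) = wmin nums l r := by
  obtain ⟨hhead, hchain, c, hlast, hlc, hbound⟩ := hq
  rw [hlast]
  simp only [Option.getD_some]
  have hcq : c ∈ q := by
    have : c ∈ q.getLast? := by rw [hlast]; rfl
    obtain ⟨hne, rfl⟩ := List.mem_getLast?_eq_getLast this
    exact List.getLast_mem hne
  have hcr : c ≤ r := chain_le_head _ _ q r hchain hhead c hcq
  apply le_antisymm
  · obtain ⟨m, hm1, hm2, hm3⟩ := wmin_attained nums l r (by omega)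
    rw [hm3]
    exact window_bound (gI nums) (fun a b => b ≤ a) (fun a b c h1 h2 => le_trans h2 h1)
      (fun a => le_rfl) q l r c ⟨hhead, hchain, c, hlast, hlc, hbound⟩ hlast m hm1 hm2
  · exact wmin_le nums l r c hlc hcr

-- ---------- A's pop loops ----------
lemma popDecA_spec (nums : List Int) (r : Nat) :
    ∀ q : List Nat, ∃ d, q = d ++ popDecA nums r q ∧
      (∀ x ∈ d, nums.getD x 0 < nums.getD r 0) ∧
      (∀ b t, popDecA nums r q = b :: t → ¬ nums.getD b 0 < nums.getD r 0) := by
  intro q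
  induction q with
  | nil => exact ⟨[], rfl, by simp, by simp [popDecA]⟩
  | cons x t ih =>
    obtain ⟨d, hd1, hd2, hd3⟩ := ih
    by_cases hc : nums.getD x 0 < nums.getD r 0
    · refine ⟨x :: d, ?_, ?_, ?_⟩
      · simp only [popDecA, if_pos hc, List.cons_append]
        rw [← hd1]
      · intro y hy
        rcases List.mem_cons.mp hy with rfl | hyt
        · exact hc
        · exact hd2 y hyt
      · intro b tb hb
        rw [popDecA, if_pos hc] at hb
        exact hd3 b tb hb
    · refine ⟨[], by simp only [List.nil_append]; rw [popDecA, if_neg hc], by simp, ?_⟩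
      intro b tb hb
      rw [popDecA, if_neg hc] at hb
      cases hb
      exact hc

lemma popIncA_spec (nums : List Int) (r : Nat) :
    ∀ q : List Nat, ∃ d, q = d ++ popIncA nums r q ∧
      (∀ x ∈ d, nums.getD r 0 < nums.getD x 0) ∧
      (∀ b t, popIncA nums r q = b :: t → ¬ nums.getD r 0 < nums.getD b 0) := by
  intro q
  induction q with
  | nil => exact ⟨[], rfl, by simp, by simp [popIncA]⟩
  | cons x t ih =>
    obtain ⟨d, hd1, hd2, hd3⟩ := ih
    by_cases hc : nums.getD r 0 < nums.getD x 0
    · refine ⟨x :: d, ?_, ?_, ?_⟩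
      · simp only [popIncA, if_pos hc, List.cons_append]
        rw [← hd1]
      · intro y hy
        rcases List.mem_cons.mp hy with rfl | hyt
        · exact hc
        · exact hd2 y hyt
      · intro b tb hb
        rw [popIncA, if_pos hc] at hb
        exact hd3 b tb hb
    · refine ⟨[], by simp only [List.nil_append]; rw [popIncA, if_neg hc], by simp, ?_⟩
      intro b tb hb
      rw [popIncA, if_neg hc] at hb
      cases hb
      exact hc

-- ---------- A's advance loop ----------
lemma advA_eq (nums : List Int) (k : Int) (r : Nat) (hk : 0 ≤ k) :
    ∀ fuel l inc dec,
      QInv (gI nums) (fun a b => a ≤ b) l r dec →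
      QInv (gI nums) (fun a b => b ≤ a) l r inc →
      l ≤ minl nums k r → minl nums k r ≤ r → minl nums k r - l ≤ fuel →
      ∃ inc' dec', advA nums k fuel l inc dec = (minl nums k r, inc', dec') ∧
        QInv (gI nums) (fun a b => a ≤ b) (minl nums k r) r dec' ∧
        QInv (gI nums) (fun a b => b ≤ a) (minl nums k r) r inc' := by
  intro fuel
  induction fuel with
  | zero =>
    intro l inc dec hdec hinc h1 h2 h3
    have hl : l = minl nums k r := by omega
    exact ⟨inc, dec, by rw [advA, hl], hl ▸ hdec, hl ▸ hinc⟩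
  | succ fuel ih =>
    intro l inc dec hdec hinc h1 h2 h3
    have hlr : l ≤ r := le_trans h1 h2
    have hdl : gI nums (dec.getLast?.getD 0) = wmax nums l r := qinv_dec_last nums k l r dec hdec
    have hil : gI nums (inc.getLast?.getD 0) = wmin nums l r := qinv_inc_last nums k l r inc hinc
    rw [advA]
    by_cases heq : l = minl nums k r
    · have hv : vld nums k l r := heq ▸ minl_vld nums k r h2
      unfold vld at hv
      have hdl' : nums.getD (dec.getLast?.getD 0) 0 = wmax nums l r := hdl
      have hil' : nums.getD (inc.getLast?.getD 0) 0 = wmin nums l r := hil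
      rw [if_neg (show ¬ k < nums.getD (dec.getLast?.getD 0) 0 - nums.getD (inc.getLast?.getD 0) 0 by omega)]
      exact ⟨inc, dec, by rw [heq], heq ▸ hdec, heq ▸ hinc⟩
    · have hlt : l < minl nums k r := lt_of_le_of_ne h1 heq
      have hnv : ¬ vld nums k l r := minl_not_vld nums k r l hlt
      unfold vld at hnv
      have hdl' : nums.getD (dec.getLast?.getD 0) 0 = wmax nums l r := hdl
      have hil' : nums.getD (inc.getLast?.getD 0) 0 = wmin nums l r := hil
      rw [if_pos (show k < nums.getD (dec.getLast?.getD 0) 0 - nums.getD (inc.getLast?.getD 0) 0 by omega)]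
      have hlr2 : l + 1 ≤ r := by omega
      have hdec2 := adv_inv (gI nums) (fun a b => a ≤ b) l r dec hdec hlr2
      have hinc2 := adv_inv (gI nums) (fun a b => b ≤ a) l r inc hinc hlr2
      exact ih (l + 1) _ _ hdec2 hinc2 (by omega) h2 (by omega)

-- ---------- Sspec bookkeeping ----------
lemma Sspec_len (nums : List Int) (k : Int) : ∀ r, ((Sspec nums k r).1).length = r + 1 := by
  intro r
  induction r with
  | zero => rfl
  | succ r ih => simp [Sspec, ih]

lemma dpLspec_len (nums : List Int) (k : Int) : ∀ r, (dpLspec nums k r).length = r + 1 := by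
  intro r
  induction r with
  | zero => rfl
  | succ r ih => simp [dpLspec, ih]

lemma Sspec_bounds (nums : List Int) (k : Int) :
    ∀ r i, 0 ≤ ((Sspec nums k r).1).getD i 0 ∧ ((Sspec nums k r).1).getD i 0 < 1000000007 := by
  intro r
  induction r with
  | zero =>
    intro i
    match i with
    | 0 => simp [Sspec]
    | i + 1 => simp [Sspec]
  | succ r ih =>
    intro i
    rcases Nat.lt_trichotomy i (r + 1) with hi | hi | hi
    · have hlen : i < ((Sspec nums k r).1).length := by rw [Sspec_len]; omega
      rw [show (Sspec nums k (r + 1)).1 = (Sspec nums k r).1 ++ [_] from rfl,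
         List.getD_append _ _ _ _ hlen]
      exact ih i
    · subst hi
      have hlen : ((Sspec nums k r).1).length = r + 1 := Sspec_len nums k r
      rw [show (Sspec nums k (r + 1)).1 = (Sspec nums k r).1 ++ [_] from rfl,
         List.getD_append_right _ _ _ _ (by omega), hlen]
      simp only [Nat.sub_self, List.getD_cons_zero]
      exact ⟨PySem.Int.mod_nonneg _ (by omega), PySem.Int.mod_lt _ (by omega)⟩
    · have hlen : ((Sspec nums k (r + 1)).1).length = r + 2 := Sspec_len nums k (r + 1)
      rw [List.getD_eq_default _ _ (by omega)]
      omega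

lemma dpLspec_getD (nums : List Int) (k : Int) : ∀ r, (dpLspec nums k r).getD r 0 = (Sspec nums k r).2 := by
  intro r
  cases r with
  | zero => rfl
  | succ r =>
    have hlen := dpLspec_len nums k r
    rw [show dpLspec nums k (r + 1) = dpLspec nums k r ++ [(Sspec nums k (r + 1)).2] from rfl,
       List.getD_append_right _ _ _ _ (by omega), hlen]
    simp

lemma set_append_len {α : Type} (xs : List α) (y : α) (ys : List α) (v : α) :
    (xs ++ y :: ys).set xs.length v = xs ++ v :: ys := by
  induction xs with
  | nil => rfl
  | cons a xs ih => simp only [List.cons_append, List.length_cons, List.set_cons_succ, ih]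

lemma set_append_len' {α : Type} (xs : List α) (y : α) (ys : List α) (v : α) (n : Nat)
    (h : n = xs.length) : (xs ++ y :: ys).set n v = xs ++ v :: ys := by
  subst h; exact set_append_len xs y ys v

-- ---------- A's main loop ----------
lemma foldA_inv (nums : List Int) (k : Int) (hk : 0 ≤ k) :
    ∀ r, r ≤ nums.length →
      ∃ l inc dec,
        (List.range r).foldl (stepA nums k nums.length)
          ((List.replicate (nums.length + 1) (0 : Int)).set 0 1,
           (List.replicate (nums.length + 1) (0 : Int)).set 0 1, 0, [], []) =
          (dpLspec nums k r ++ List.replicate (nums.length - r) 0,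
           (Sspec nums k r).1 ++ List.replicate (nums.length - r) 0, l, inc, dec) ∧
        (r = 0 → l = 0 ∧ inc = [] ∧ dec = []) ∧
        (1 ≤ r → l = minl nums k (r - 1) ∧
          QInv (gI nums) (fun a b => a ≤ b) l (r - 1) dec ∧
          QInv (gI nums) (fun a b => b ≤ a) l (r - 1) inc) := by
  intro r
  induction r with
  | zero =>
    intro _
    refine ⟨0, [], [], ?_, fun _ => ⟨rfl, rfl, rfl⟩, fun h => absurd h (by omega)⟩
    simp only [List.range_zero, List.foldl_nil, Nat.sub_zero]
    have h1 : (List.replicate (nums.length + 1) (0 : Int)).set 0 1 =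
        [(1 : Int)] ++ List.replicate nums.length 0 := by
      rw [List.replicate_succ, List.set_cons_zero, List.singleton_append]
    rw [h1]
    rfl
  | succ r ih =>
    intro hr1
    obtain ⟨l, inc, dec, hfold, h0, h1⟩ := ih (by omega)
    have hminr := minl_le nums k r hk
    have hpush : QInv (gI nums) (fun a b => a ≤ b) l r (r :: popDecA nums r dec) ∧
        QInv (gI nums) (fun a b => b ≤ a) l r (r :: popIncA nums r inc) ∧ l ≤ minl nums k r := by
      rcases Nat.eq_zero_or_pos r with rfl | hrpos
      · obtain ⟨hl0, hinc0, hdec0⟩ := h0 rfl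
        subst hl0; subst hinc0; subst hdec0
        refine ⟨⟨rfl, List.isChain_singleton _, 0, rfl, le_rfl, ?_⟩,
          ⟨rfl, List.isChain_singleton _, 0, rfl, le_rfl, ?_⟩, by omega⟩
        · intro j hj1 hj2
          have hj : j = 0 := by omega
          subst hj
          exact le_rfl
        · intro j hj1 hj2
          have hj : j = 0 := by omega
          subst hj
          exact le_rfl
      · obtain ⟨hl, hdecq, hincq⟩ := h1 hrpos
        have hr' : r - 1 + 1 = r := by omega
        obtain ⟨dd, hdd1, hdd2, hdd3⟩ := popDecA_spec nums r dec
        obtain ⟨di, hdi1, hdi2, hdi3⟩ := popIncA_spec nums r inc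
        refine ⟨?_, ?_, ?_⟩
        · have hp := push_inv (gI nums) (fun a b => a ≤ b) (fun a b c hab hbc => le_trans hab hbc)
            (fun a => le_rfl) (fun a b h => le_of_not_ge h) l (r - 1) dec (popDecA nums r dec) dd
            hdecq hdd1
            (by rw [hr']; intro x hx; exact not_le_of_gt (hdd2 x hx))
            (by rw [hr']; intro b t hbt; exact le_of_not_gt (hdd3 b t hbt))
          rw [hr'] at hp
          exact hp
        · have hp := push_inv (gI nums) (fun a b => b ≤ a) (fun a b c hab hbc => le_trans hbc hab)
            (fun a => le_rfl) (fun a b h => le_of_not_ge h) l (r - 1) inc (popIncA nums r inc) di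
            hincq hdi1
            (by rw [hr']; intro x hx; exact not_le_of_gt (hdi2 x hx))
            (by rw [hr']; intro b t hbt; exact le_of_not_gt (hdi3 b t hbt))
          rw [hr'] at hp
          exact hp
        · rw [hl]
          have := minl_mono nums k r hk hrpos
          omega
    obtain ⟨hdecQ, hincQ, hlm⟩ := hpush
    obtain ⟨inc2, dec2, hadv, hdec2, hinc2⟩ := advA_eq nums k r hk nums.length l
      (r :: popIncA nums r inc) (r :: popDecA nums r dec) hdecQ hincQ hlm hminr (by omega)
    -- value–level facts
    have hgetr : ((Sspec nums k r).1 ++ List.replicate (nums.length - r) (0 : Int)).getD r 0 =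
        ((Sspec nums k r).1).getD r 0 := List.getD_append _ _ _ _ (by rw [Sspec_len]; omega)
    have hgetl : ((Sspec nums k r).1 ++ List.replicate (nums.length - r) (0 : Int)).getD
        (minl nums k r - 1) 0 = ((Sspec nums k r).1).getD (minl nums k r - 1) 0 :=
      List.getD_append _ _ _ _ (by rw [Sspec_len]; omega)
    have hdpv : (if 0 < minl nums k r then
          PySem.Int.mod (((Sspec nums k r).1).getD r 0 -
            ((Sspec nums k r).1).getD (minl nums k r - 1) 0 + 1000000007) 1000000007
        else ((Sspec nums k r).1).getD r 0) = (Sspec nums k (r + 1)).2 := by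
      show _ = (Sspec nums k (r + 1)).2
      conv_rhs => rw [Sspec]
      dsimp only
      rw [if_neg (show ¬ minl nums k r = r + 1 by omega)]
      split_ifs with hpos
      · rw [PySem.Int.mod_eq_emod_of_pos (by omega), PySem.Int.mod_eq_emod_of_pos (by omega)]
        omega
      · obtain ⟨hb1, hb2⟩ := Sspec_bounds nums k r r
        rw [PySem.Int.mod_eq_emod_of_pos (by omega), sub_zero]
        exact (Int.emod_eq_of_lt hb1 hb2).symm
    have hrep : List.replicate (nums.length - r) (0 : Int) =
        0 :: List.replicate (nums.length - (r + 1)) 0 := by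
      rw [show nums.length - r = (nums.length - (r + 1)) + 1 by omega, List.replicate_succ]
    refine ⟨minl nums k r, inc2, dec2, ?_, fun h => absurd h (by omega),
      fun _ => ⟨by simp, by simpa using hdec2, by simpa using hinc2⟩⟩
    rw [List.range_succ, List.foldl_append, hfold, List.foldl_cons, List.foldl_nil]
    unfold stepA
    dsimp only
    rw [hadv]
    dsimp only
    simp only [Prod.mk.injEq, and_true]
    have hdpL : (dpLspec nums k r ++ List.replicate (nums.length - r) (0 : Int)).set (r + 1)
          ((if 0 < minl nums k r then
            PySem.Int.mod (((Sspec nums k r).1 ++ List.replicate (nums.length - r) (0 : Int)).getD r 0 -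
              ((Sspec nums k r).1 ++ List.replicate (nums.length - r) (0 : Int)).getD (minl nums k r - 1) 0 +
              1000000007) 1000000007
          else ((Sspec nums k r).1 ++ List.replicate (nums.length - r) (0 : Int)).getD r 0)) =
        dpLspec nums k (r + 1) ++ List.replicate (nums.length - (r + 1)) 0 := by
      rw [hgetr, hgetl, hdpv, hrep,
        set_append_len' (dpLspec nums k r) 0 (List.replicate (nums.length - (r + 1)) 0)
          ((Sspec nums k (r + 1)).2) (r + 1) (by rw [dpLspec_len])]
      conv_rhs => rw [dpLspec]
      rw [List.append_cons]
    have hpreL : ((Sspec nums k r).1 ++ List.replicate (nums.length - r) (0 : Int)).set (r + 1)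
          (PySem.Int.mod (((Sspec nums k r).1 ++ List.replicate (nums.length - r) (0 : Int)).getD r 0 +
            (if 0 < minl nums k r then
              PySem.Int.mod (((Sspec nums k r).1 ++ List.replicate (nums.length - r) (0 : Int)).getD r 0 -
                ((Sspec nums k r).1 ++ List.replicate (nums.length - r) (0 : Int)).getD (minl nums k r - 1) 0 +
                1000000007) 1000000007
            else ((Sspec nums k r).1 ++ List.replicate (nums.length - r) (0 : Int)).getD r 0)) 1000000007) =
        (Sspec nums k (r + 1)).1 ++ List.replicate (nums.length - (r + 1)) 0 := by
      rw [hgetr, hgetl, hdpv, hrep,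
        set_append_len' ((Sspec nums k r).1) 0 (List.replicate (nums.length - (r + 1)) 0)
          (PySem.Int.mod (((Sspec nums k r).1).getD r 0 + (Sspec nums k (r + 1)).2) 1000000007)
          (r + 1) (by rw [Sspec_len])]
      show (Sspec nums k r).1 ++ _ :: _ = (Sspec nums k (r + 1)).1 ++ _
      conv_rhs => rw [Sspec]
      dsimp only
      rw [List.append_cons]
      rfl
    exact ⟨hdpL, hpreL⟩

-- ---------- B's sparse tables ----------
def TabOK (nums : List Int) (n : Nat) (mx mn : List (List Int)) : Prop :=
  ∀ j i, 1 <<< j ≤ n → i + 1 <<< j ≤ n →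
    (mx.getD j []).getD i 0 = wmax nums i (i + 1 <<< j - 1) ∧
    (mn.getD j []).getD i 0 = wmin nums i (i + 1 <<< j - 1)

lemma two_pow_mono {a b : Nat} (h : a ≤ b) : 2 ^ a ≤ 2 ^ b := Nat.pow_le_pow_right (by omega) h

lemma build_ok (nums : List Int) (n : Nat) :
    ∀ fuel j mx mn, 1 ≤ j → mx.length = j → mn.length = j → n + 1 - j ≤ fuel →
      (∀ j' i, j' < j → i + 1 <<< j' ≤ n →
        (mx.getD j' []).getD i 0 = wmax nums i (i + 1 <<< j' - 1) ∧
        (mn.getD j' []).getD i 0 = wmin nums i (i + 1 <<< j' - 1)) →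
      TabOK nums n (buildTabB nums n fuel j (mx, mn)).1 (buildTabB nums n fuel j (mx, mn)).2 := by
  intro fuel
  induction fuel with
  | zero =>
    intro j mx mn hj hlx hln hfuel hlev
    have hjn : n + 1 ≤ j := by omega
    intro j' i hsz hi
    refine hlev j' i ?_ hi
    have h1 : (2 : Nat) ^ j' ≤ n := by rw [← Nat.one_shiftLeft]; exact hsz
    have h2 : n < 2 ^ j := lt_of_lt_of_le Nat.lt_two_pow_self (two_pow_mono (by omega))
    by_contra hc
    have := two_pow_mono (show j ≤ j' by omega)
    omega
  | succ fuel ih =>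
    intro j mx mn hj hlx hln hfuel hlev
    rw [buildTabB]
    by_cases hcond : 1 <<< j ≤ n
    · rw [if_pos hcond]
      have hpow : (1 : Nat) <<< j = 2 ^ j := Nat.one_shiftLeft j
      have hhalf : (1 : Nat) <<< (j - 1) = 2 ^ (j - 1) := Nat.one_shiftLeft _
      have hsum : 2 ^ (j - 1) + 2 ^ (j - 1) = 2 ^ j := by
        conv_rhs => rw [show j = (j - 1) + 1 by omega, Nat.pow_succ]
        omega
      have hjlt : j ≤ n := by
        have : j < 2 ^ j := Nat.lt_two_pow_self
        rw [hpow] at hcond; omega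
      have hlastx : mx.getLast?.getD [] = mx.getD (j - 1) [] := by
        rw [List.getLast?_eq_getElem?, hlx, List.getD_eq_getElem?_getD]
      have hlastn : mn.getLast?.getD [] = mn.getD (j - 1) [] := by
        rw [List.getLast?_eq_getElem?, hln, List.getD_eq_getElem?_getD]
      apply ih (j + 1) _ _ (by omega) (by simp [hlx]) (by simp [hln]) (by omega)
      intro j' i hj' hi'
      rcases Nat.lt_or_ge j' j with hlt | hge
      · rw [List.getD_append _ _ _ _ (by omega), List.getD_append _ _ _ _ (by omega)]
        exact hlev j' i hlt hi'
      · have hj'j : j' = j := by omega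
        subst hj'j
        rw [List.getD_append_right _ _ _ _ (by omega), List.getD_append_right _ _ _ _ (by omega),
            hlx, hln]
        simp only [Nat.sub_self, List.getD_cons_zero]
        have hone : 1 ≤ 2 ^ (j' - 1) := Nat.one_le_two_pow
        have hij : i + 2 ^ j' ≤ n := by rw [← hpow]; exact hi'
        have hilen : i < n - 1 <<< j' + 1 := by rw [hpow]; omega
        rw [PySem.List.getD_map_range _ _ _ _ hilen, PySem.List.getD_map_range _ _ _ _ hilen,
            hlastx, hlastn]
        obtain ⟨hax, han⟩ := hlev (j' - 1) i (by omega) (by rw [hhalf]; omega)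
        obtain ⟨hbx, hbn⟩ := hlev (j' - 1) (i + 1 <<< (j' - 1)) (by omega) (by rw [hhalf]; omega)
        rw [hax, han, hbx, hbn]
        have e1 : i + 1 <<< (j' - 1) + 1 <<< (j' - 1) - 1 = i + 1 <<< j' - 1 := by
          rw [hhalf, hpow]; omega
        have e2 : i + 1 <<< (j' - 1) = (i + 1 <<< (j' - 1) - 1) + 1 := by rw [hhalf]; omega
        rw [e1]
        constructor
        · conv_lhs => rw [e2]
          apply wmax_union
          · rw [hhalf]; omega
          · rw [hhalf, hpow]; omega
        · conv_lhs => rw [e2]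
          apply wmin_union
          · rw [hhalf]; omega
          · rw [hhalf, hpow]; omega
    · rw [if_neg hcond]
      rw [Nat.one_shiftLeft] at hcond
      intro j' i hsz hi
      refine hlev j' i ?_ hi
      have h1 : (2 : Nat) ^ j' ≤ n := by rw [← Nat.one_shiftLeft]; exact hsz
      by_contra hc
      have := two_pow_mono (show j ≤ j' by omega)
      omega

lemma tab_init (nums : List Int) :
    TabOK nums nums.length (buildTabB nums nums.length (nums.length + 1) 1 ([nums], [nums])).1
      (buildTabB nums nums.length (nums.length + 1) 1 ([nums], [nums])).2 := by
  apply build_ok nums nums.length (nums.length + 1) 1 [nums] [nums] le_rfl rfl rfl (by omega)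
  intro j' i hj' hi
  have hj0 : j' = 0 := by omega
  subst hj0
  simp only [List.getD_cons_zero]
  have h1 : (1 : Nat) <<< 0 = 1 := rfl
  rw [h1] at hi ⊢
  have : i + 1 - 1 = i := by omega
  rw [this, wmax_self, wmin_self]
  exact ⟨rfl, rfl⟩

lemma spread_eq (nums : List Int) (n : Nat) (mx mn : List (List Int)) (hT : TabOK nums n mx mn)
    (l r : Nat) (hlr : l ≤ r) (hr : r < n) (hn : n ≤ nums.length) :
    spreadB mx mn l r = wmax nums l r - wmin nums l r := by
  have hw1 : 1 ≤ r - l + 1 := by omega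
  have hwn : r - l + 1 ≤ n := by omega
  have hne : ((r - l + 1 : Nat) : Int) ≠ 0 := by
    simp only [ne_eq, Nat.cast_eq_zero]; omega
  have hbl1 : 1 ≤ PySem.Int.bitLength ((r - l + 1 : Nat) : Int) := by
    by_contra hc
    have h0 := PySem.Int.lt_two_pow_bitLength ((r - l + 1 : Nat) : Int)
    have hbl0 : PySem.Int.bitLength ((r - l + 1 : Nat) : Int) = 0 := by omega
    rw [hbl0] at h0
    simp only [Int.natAbs_natCast, pow_zero] at h0
    omega
  set bl := PySem.Int.bitLength ((r - l + 1 : Nat) : Int) with hbl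
  have hlow : 2 ^ (bl - 1) ≤ r - l + 1 := by
    have := PySem.Int.two_pow_bitLength_le ((r - l + 1 : Nat) : Int) hne
    simpa using this
  have hhigh : r - l + 1 < 2 ^ bl := by
    have := PySem.Int.lt_two_pow_bitLength ((r - l + 1 : Nat) : Int)
    simpa using this
  have hpw : (1 : Nat) <<< (bl - 1) = 2 ^ (bl - 1) := Nat.one_shiftLeft _
  have hbl2 : 2 ^ bl = 2 ^ (bl - 1) * 2 := by
    conv_lhs => rw [show bl = (bl - 1) + 1 by omega, Nat.pow_succ]
  unfold spreadB
  dsimp only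
  rw [hpw]
  obtain ⟨hax, han⟩ := hT (bl - 1) l (by rw [Nat.one_shiftLeft]; omega) (by rw [Nat.one_shiftLeft]; omega)
  obtain ⟨hbx, hbn⟩ := hT (bl - 1) (r + 1 - 2 ^ (bl - 1)) (by rw [Nat.one_shiftLeft]; omega)
    (by rw [Nat.one_shiftLeft]; omega)
  rw [Nat.one_shiftLeft] at hax han hbx hbn
  rw [← hbl, hax, han, hbx, hbn]
  have e1 : r + 1 - 2 ^ (bl - 1) + 2 ^ (bl - 1) - 1 = r := by omega
  rw [e1]
  have hov1 : l ≤ l + 2 ^ (bl - 1) - 1 := by omega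
  have hov2 : r + 1 - 2 ^ (bl - 1) ≤ r := by omega
  have hov3 : l ≤ r + 1 - 2 ^ (bl - 1) := by omega
  have hov4 : r + 1 - 2 ^ (bl - 1) ≤ (l + 2 ^ (bl - 1) - 1) + 1 := by omega
  have hov5 : l + 2 ^ (bl - 1) - 1 ≤ r := by omega
  rw [wmax_overlap nums l (l + 2 ^ (bl - 1) - 1) (r + 1 - 2 ^ (bl - 1)) r hov1 hov2 hov3 hov4 hov5,
     wmin_overlap nums l (l + 2 ^ (bl - 1) - 1) (r + 1 - 2 ^ (bl - 1)) r hov1 hov2 hov3 hov4 hov5]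

-- ---------- B's binary search ----------
lemma bs_eq (nums : List Int) (k : Int) (n : Nat) (mx mn : List (List Int))
    (hT : TabOK nums n mx mn) (r : Nat) (hr : r < n) (hn : n ≤ nums.length) :
    ∀ fuel lo hi, lo ≤ minl nums k r → minl nums k r ≤ hi → hi ≤ r + 1 → hi - lo ≤ fuel →
      bsB mx mn k r fuel lo hi = minl nums k r := by
  intro fuel
  induction fuel with
  | zero =>
    intro lo hi h1 h2 h3 h4
    rw [bsB]
    omega
  | succ fuel ih =>
    intro lo hi h1 h2 h3 h4
    rw [bsB]
    dsimp only
    by_cases hlh : lo < hi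
    · rw [if_pos hlh]
      have hmid1 : lo ≤ (lo + hi) / 2 := by omega
      have hmid2 : (lo + hi) / 2 < hi := by omega
      have hmidr : (lo + hi) / 2 ≤ r := by omega
      rw [spread_eq nums n mx mn hT ((lo + hi) / 2) r hmidr (by omega) hn]
      by_cases hv : wmax nums ((lo + hi) / 2) r - wmin nums ((lo + hi) / 2) r ≤ k
      · rw [if_pos hv]
        have := minl_le_of_vld nums k ((lo + hi) / 2) r hmidr hv
        exact ih lo ((lo + hi) / 2) h1 this (by omega) (by omega)
      · rw [if_neg hv]
        have hgt : (lo + hi) / 2 < minl nums k r := by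
          by_contra hc
          exact hv (vld_mono nums k (minl nums k r) ((lo + hi) / 2) r (by omega) hmidr
            (minl_vld nums k r (by omega)))
        exact ih ((lo + hi) / 2 + 1) hi (by omega) h2 h3 (by omega)
    · rw [if_neg hlh]
      omega

-- ---------- B's main loop ----------
lemma foldB_inv (nums : List Int) (k : Int) (mx mn : List (List Int))
    (hT : TabOK nums nums.length mx mn) :
    ∀ r, r ≤ nums.length →
      (List.range r).foldl (stepB mx mn k) ([1], 1) = Sspec nums k r := by
  intro r
  induction r with
  | zero => intro _; rfl
  | succ r ih =>
    intro hr
    rw [List.range_succ, List.foldl_append, ih (by omega), List.foldl_cons, List.foldl_nil]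
    show stepB mx mn k (Sspec nums k r) r = Sspec nums k (r + 1)
    unfold stepB
    rw [bs_eq nums k nums.length mx mn hT r (by omega) le_rfl (r + 1) 0 (r + 1) (by omega)
      (minl_le_succ nums k r) le_rfl (by omega)]
    rfl

lemma alt_eq_spec (nums : List Int) (k : Int) :
    countPartitions2_alt nums k = (Sspec nums k nums.length).2 := by
  unfold countPartitions2_alt
  dsimp only
  rw [foldB_inv nums k _ _ (tab_init nums) nums.length le_rfl]

lemma a_eq_spec (nums : List Int) (k : Int) (hk : 0 ≤ k) :
    countPartitions2 nums k = (Sspec nums k nums.length).2 := by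
  unfold countPartitions2
  dsimp only
  obtain ⟨l, inc, dec, hfold, _, _⟩ := foldA_inv nums k hk nums.length le_rfl
  rw [hfold]
  dsimp only
  rw [Nat.sub_self, List.replicate_zero, List.append_nil, dpLspec_getD]


-- ===== VERDICT (by name: the statement is the Claim_ definition above) =====
theorem countPartitions2_spec : Claim_equal_countPartitions2 := by
  intro nums k _ hpre
  unfold Spec_countPartitions2
  rcases hpre with h | h
  · subst h; rfl
  · rw [a_eq_spec nums k h, alt_eq_spec nums k]
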